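-- pv_equiv track=rewrite | github.com/fhinsley/AI_news_reel | newsreel/build_video.py | wrap_sources
-- ===== SOURCE A (Python) =====
-- def wrap_sources(sources_text, max_line_length=60):
--     items = [s.strip() for s in sources_text.split(",")]
--     lines = []
--     current_line = ""
--     for item in items:
--         test_line = current_line + ", " + item if current_line else item
--         if len(test_line) > max_line_length and current_line:
--             lines.append(current_line + ",")
--             current_line = item
--         else:
--             current_line = test_line
--     if current_line:
--         lines.append(current_line)
--     return "\n".join(lines)
-- ===== SOURCE B (Python) =====
-- def wrap_sources(sources_text, max_line_length=60):
--     # Cut-point algorithm: instead of growing a current-line string, scan with two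
--     # indices to find each line's end, then slice-and-join that segment.
--     items = [s.strip() for s in sources_text.split(",")]
--     n = len(items)
--     lines = []
--     i = 0
--     while i < n:
--         if items[i] == "":
--             i += 1          # an empty item never opens a line
--             continue
--         width = len(items[i])
--         j = i + 1
--         while j < n and width + 2 + len(items[j]) <= max_line_length:
--             width += 2 + len(items[j])
--             j += 1
--         seg = ", ".join(items[i:j])
--         lines.append(seg + "," if j < n else seg)
--         i = j
--     return "\n".join(lines)
-- ===== Notes on version B (the rewrite author's own statement) =====
-- stated objective: alternative
-- what changed: A grows each line as a string inside one fold over the items; B is a cut-point algorithm: an outer index loop finds where each line starts (skipping empty items, which never open a line), an inner index scan advances a cut point j by pure length arithmetic until the line is full, and the line is produced by slicing the items between the two indices and comma-space-joining them, with a trailing comma added exactly when more items follow.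
import Mathlib
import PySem

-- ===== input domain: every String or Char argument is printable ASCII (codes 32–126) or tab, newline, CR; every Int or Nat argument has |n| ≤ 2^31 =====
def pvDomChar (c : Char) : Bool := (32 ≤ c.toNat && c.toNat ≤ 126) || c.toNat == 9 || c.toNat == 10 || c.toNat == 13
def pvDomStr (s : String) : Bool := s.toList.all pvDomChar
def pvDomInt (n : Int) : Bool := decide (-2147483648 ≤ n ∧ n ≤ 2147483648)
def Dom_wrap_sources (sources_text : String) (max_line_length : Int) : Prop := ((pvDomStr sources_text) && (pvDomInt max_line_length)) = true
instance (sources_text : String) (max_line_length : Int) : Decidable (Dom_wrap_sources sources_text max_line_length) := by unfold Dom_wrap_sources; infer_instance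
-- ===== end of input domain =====

-- B replaces A's fold that grows a current-line string by a cut-point algorithm: an outer index loop
-- over line starts with an inner index scan that finds each line's end by length arithmetic, then
-- slices and joins that segment; same return value as A.

-- ===== PORT A =====
def wrap_sources (sources_text : String) (max_line_length : Int) : String :=
  -- sources_text.split(",") : the separator is the non-empty literal ",", so split? is always some
  let items := ((PySem.Str.split? sources_text ",").getD []).map PySem.Str.strip
  let st := items.foldl (fun (st : List String × String) item =>
    let test_line := if st.2 ≠ "" then st.2 ++ ", " ++ item else item
    if PySem.Str.len test_line > max_line_length ∧ st.2 ≠ "" then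
      (st.1 ++ [st.2 ++ ","], item)
    else
      (st.1, test_line)) ([], "")
  let lines := if st.2 ≠ "" then st.1 ++ [st.2] else st.1
  PySem.Str.join "\n" lines

-- ===== PORT B =====
-- inner while loop of Source B: advance the cut point j while the next item still fits.
-- The first argument is fuel (an upper bound on the number of iterations, a pure totality
-- guard: the loop advances j by 1 each iteration and stops at items.length).
def pvScanB (items : List String) (m : Int) : Nat → Int → Nat → Nat
  | 0, _, j => j
  | rem + 1, width, j =>
    if j < items.length ∧ width + 2 + PySem.Str.len (items.getD j "") ≤ m then
      pvScanB items m rem (width + 2 + PySem.Str.len (items.getD j "")) (j + 1)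
    else j

-- outer while loop of Source B, same fuel discipline (each iteration moves i strictly forward);
-- items[i:j] with 0 ≤ i ≤ j is exactly (items.drop i).take (j - i)
def pvOuterB (items : List String) (m : Int) : Nat → Nat → List String → List String
  | 0, _, lines => lines
  | rem + 1, i, lines =>
    if i < items.length then
      if items.getD i "" = "" then
        pvOuterB items m rem (i + 1) lines
      else
        let j := pvScanB items m (items.length - (i + 1)) (PySem.Str.len (items.getD i "")) (i + 1)
        let seg := PySem.Str.join ", " ((items.drop i).take (j - i))
        pvOuterB items m rem j (lines ++ [if j < items.length then seg ++ "," else seg])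
    else lines

def wrap_sources_alt (sources_text : String) (max_line_length : Int) : String :=
  let items := ((PySem.Str.split? sources_text ",").getD []).map PySem.Str.strip
  PySem.Str.join "\n" (pvOuterB items max_line_length items.length 0 [])

-- ===== PRECONDITION & SPEC =====
def Spec_wrap_sources (sources_text : String) (max_line_length : Int) (out : String) : Prop := out = wrap_sources_alt sources_text max_line_length
instance (sources_text : String) (max_line_length : Int) (out : String) : Decidable (Spec_wrap_sources sources_text max_line_length out) := by unfold Spec_wrap_sources; infer_instance

-- ===== CLAIM (what is proved, stated in full; the proofs are below) =====
def Claim_equal_wrap_sources : Prop := ∀ (sources_text : String) (max_line_length : Int), Dom_wrap_sources sources_text max_line_length → Spec_wrap_sources sources_text max_line_length (wrap_sources sources_text max_line_length)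

-- ===== LEMMAS AND PROOFS =====

-- ", ".join of a segment, and items[i:j]
def pvJc (l : List String) : String := PySem.Str.join ", " l
def pvSlice (items : List String) (i j : Nat) : List String := (items.drop i).take (j - i)

-- A's loop body as a named function (definitionally the lambda of the port)
def pvStepA (m : Int) (st : List String × String) (item : String) : List String × String :=
  let test_line := if st.2 ≠ "" then st.2 ++ ", " ++ item else item
  if PySem.Str.len test_line > m ∧ st.2 ≠ "" then
    (st.1 ++ [st.2 ++ ","], item)
  else
    (st.1, test_line)

-- A's trailing "if current_line: lines.append(current_line)"
def pvFinish (st : List String × String) : List String :=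
  if st.2 ≠ "" then st.1 ++ [st.2] else st.1

lemma wrap_sources_eq (s : String) (m : Int) :
    wrap_sources s m = PySem.Str.join "\n"
      (pvFinish ((((PySem.Str.split? s ",").getD []).map PySem.Str.strip).foldl (pvStepA m) ([], ""))) := rfl

lemma pvJc_singleton (x : String) : pvJc [x] = x := by
  rw [pvJc, ← String.toList_inj, PySem.Str.toList_join]
  simp [PySem.Chars.join_singleton]

lemma pvChars_join_append (sep : List Char) (l : List (List Char)) (x : List Char) (h : l ≠ []) :
    PySem.Chars.join sep (l ++ [x]) = PySem.Chars.join sep l ++ sep ++ x := by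
  induction l with
  | nil => exact absurd rfl h
  | cons a t ih =>
    cases t with
    | nil => simp [PySem.Chars.join_singleton, PySem.Chars.join_cons_cons]
    | cons b u =>
      have ih' := ih (by simp)
      rw [List.cons_append] at ih'
      rw [List.cons_append, List.cons_append, PySem.Chars.join_cons_cons, ih',
        PySem.Chars.join_cons_cons]
      simp [List.append_assoc]

lemma pvJc_append (l : List String) (x : String) (h : l ≠ []) :
    pvJc (l ++ [x]) = pvJc l ++ ", " ++ x := by
  rw [pvJc, pvJc, ← String.toList_inj]
  simp only [PySem.Str.toList_join, List.map_append, List.map_cons, List.map_nil,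
    String.toList_append]
  exact pvChars_join_append _ _ _ (by simpa using h)

lemma pvLen_pos_iff (s : String) : 0 < PySem.Str.len s ↔ s ≠ "" := by
  rw [PySem.Str.len_eq]
  constructor
  · intro h he; subst he; simp at h
  · intro h
    have hl : s.toList ≠ [] := fun he => h (by rw [← String.toList_inj, he]; rfl)
    exact_mod_cast List.length_pos_iff.mpr hl

lemma pvLen_sep : PySem.Str.len ", " = 2 := by decide

lemma pvLen_test (c item : String) :
    PySem.Str.len (c ++ ", " ++ item) = PySem.Str.len c + 2 + PySem.Str.len item := by
  rw [PySem.Str.len_append, PySem.Str.len_append, pvLen_sep]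

-- slice facts
lemma pvSlice_single (items : List String) (i : Nat) (h : i < items.length) :
    pvSlice items i (i + 1) = [items.getD i ""] := by
  rw [pvSlice, show i + 1 - i = 1 from by omega, List.drop_eq_getElem_cons h,
    List.getD_eq_getElem items "" h]
  rfl

lemma pvSlice_snoc (items : List String) (i j : Nat) (hij : i ≤ j) (h : j < items.length) :
    pvSlice items i (j + 1) = pvSlice items i j ++ [items.getD j ""] := by
  rw [pvSlice, pvSlice, show j + 1 - i = (j - i) + 1 by omega, List.take_add_one]
  have : (items.drop i)[j - i]? = some (items.getD j "") := by
    rw [List.getElem?_drop, show i + (j - i) = j by omega, List.getElem?_eq_getElem h]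
    simp [List.getD, h]
  rw [this]; rfl

lemma pvSlice_ne_nil (items : List String) (i j : Nat) (hij : i < j) (h : i < items.length) :
    pvSlice items i j ≠ [] := by
  have : (pvSlice items i j).length = min (j - i) (items.length - i) := by
    simp [pvSlice]
  intro he
  rw [he] at this
  simp at this
  omega

lemma pvDrop_cons (items : List String) (j : Nat) (h : j < items.length) :
    items.drop j = items.getD j "" :: items.drop (j + 1) := by
  rw [List.drop_eq_getElem_cons h]
  simp [List.getD, h]

-- the scan never moves the cut point backwards
lemma pvScanB_le (items : List String) (m : Int) :
    ∀ (rem : Nat) (w : Int) (j : Nat), j ≤ pvScanB items m rem w j := by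
  intro rem
  induction rem with
  | zero => intro w j; exact Nat.le_refl j
  | succ rem ih =>
    intro w j
    rw [pvScanB]
    split
    · exact Nat.le_trans (by omega) (ih _ (j + 1))
    · exact Nat.le_refl j

-- a stopped scan returns j whatever the fuel
lemma pvScanB_stop (items : List String) (m : Int) (rem : Nat) (w : Int) (j : Nat)
    (h : ¬ (j < items.length ∧ w + 2 + PySem.Str.len (items.getD j "") ≤ m)) :
    pvScanB items m rem w j = j := by
  cases rem with
  | zero => rfl
  | succ rem => rw [pvScanB, if_neg h]

-- the outer loop is fuel-irrelevant once the fuel covers the remaining items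
lemma pvOuterB_fuel (items : List String) (m : Int) :
    ∀ (rem rem' i : Nat) (lines : List String), items.length - i ≤ rem →
      items.length - i ≤ rem' → pvOuterB items m rem i lines = pvOuterB items m rem' i lines := by
  intro rem
  induction rem with
  | zero =>
    intro rem' i lines h _
    cases rem' with
    | zero => rfl
    | succ rem' => rw [pvOuterB, pvOuterB, if_neg (by omega)]
  | succ rem ih =>
    intro rem' i lines h h'
    cases rem' with
    | zero => rw [pvOuterB, pvOuterB, if_neg (by omega)]
    | succ rem' =>
      by_cases hi : i < items.length
      · by_cases he : items.getD i "" = ""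
        · rw [pvOuterB, pvOuterB, if_pos hi, if_pos hi, if_pos he, if_pos he]
          exact ih rem' (i + 1) lines (by omega) (by omega)
        · rw [pvOuterB, pvOuterB, if_pos hi, if_pos hi, if_neg he, if_neg he]
          have hj := pvScanB_le items m (items.length - (i + 1))
            (PySem.Str.len (items.getD i "")) (i + 1)
          exact ih rem' _ _ (by omega) (by omega)
      · rw [pvOuterB, pvOuterB, if_neg hi, if_neg hi]

-- THE INVARIANT. Main: starting A's loop at position i with an empty current line is B's outer loop.
-- Inner: starting A's loop at position j with current line ", ".join(items[i:j]) closes the line at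
-- the cut point the scan finds and continues as B's outer loop from there.
lemma pvCombined (items : List String) (m : Int) : ∀ k : Nat,
    (∀ i lines, items.length - i = k →
      pvFinish (List.foldl (pvStepA m) (lines, "") (items.drop i))
        = pvOuterB items m (items.length - i) i lines)
    ∧ (∀ i j lines, items.length - j = k → i < j → j ≤ items.length → i < items.length →
        pvJc (pvSlice items i j) ≠ "" →
      pvFinish (List.foldl (pvStepA m) (lines, pvJc (pvSlice items i j)) (items.drop j))
        = pvOuterB items m
            (items.length - pvScanB items m (items.length - j) (PySem.Str.len (pvJc (pvSlice items i j))) j)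
            (pvScanB items m (items.length - j) (PySem.Str.len (pvJc (pvSlice items i j))) j)
            (lines ++ [if pvScanB items m (items.length - j) (PySem.Str.len (pvJc (pvSlice items i j))) j < items.length
                       then pvJc (pvSlice items i (pvScanB items m (items.length - j) (PySem.Str.len (pvJc (pvSlice items i j))) j)) ++ ","
                       else pvJc (pvSlice items i (pvScanB items m (items.length - j) (PySem.Str.len (pvJc (pvSlice items i j))) j))])) := by
  intro k
  induction k using Nat.strong_induction_on with
  | _ k ih =>
    constructor
    · -- MAIN
      intro i lines hk
      by_cases hi : i < items.length
      · rw [pvDrop_cons items i hi, List.foldl_cons,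
          show items.length - i = (items.length - (i + 1)) + 1 from by omega, pvOuterB, if_pos hi]
        by_cases he : items.getD i "" = ""
        · -- empty item never opens a line
          have hstep : pvStepA m (lines, "") (items.getD i "") = (lines, "") := by
            have he' : items[i]?.getD "" = "" := by simpa [List.getD] using he
            simp [pvStepA, List.getD, he']
          rw [if_pos he, hstep]
          exact (ih (k - 1) (by omega)).1 (i + 1) lines (by omega)
        · -- nonempty item opens a line
          have hstep : pvStepA m (lines, "") (items.getD i "") = (lines, items.getD i "") := by
            simp [pvStepA]
          rw [if_neg he, hstep]
          have hcur : items.getD i "" = pvJc (pvSlice items i (i + 1)) := by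
            rw [pvSlice_single items i hi, pvJc_singleton]
          have hinner := (ih (k - 1) (by omega)).2 i (i + 1) lines (by omega) (by omega)
            (by omega) hi (by rw [← hcur]; exact he)
          rw [← hcur] at hinner
          rw [hinner]
          have hj := pvScanB_le items m (items.length - (i + 1))
            (PySem.Str.len (items.getD i "")) (i + 1)
          exact pvOuterB_fuel items m _ _ _ _ (by omega) (by omega)
      · have hd : items.drop i = [] := List.drop_eq_nil_of_le (by omega)
        rw [hd, List.foldl_nil, show items.length - i = 0 from by omega, pvOuterB]
        simp [pvFinish]
    · -- INNER
      intro i j lines hk hij hjle hilt hne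
      by_cases hj : j < items.length
      · set cur := pvJc (pvSlice items i j) with hcurdef
        set b := items.getD j "" with hbdef
        rw [pvDrop_cons items j hj, List.foldl_cons]
        by_cases hfit : PySem.Str.len cur + 2 + PySem.Str.len b ≤ m
        · -- the next item still fits: both extend the current line
          have hstep : pvStepA m (lines, cur) b = (lines, cur ++ ", " ++ b) := by
            dsimp only [pvStepA]
            rw [if_pos hne, pvLen_test, if_neg (fun hc => absurd hc.1 (by omega))]
          have hsnoc : cur ++ ", " ++ b = pvJc (pvSlice items i (j + 1)) := by
            rw [pvSlice_snoc items i j (by omega) hj,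
              pvJc_append _ _ (pvSlice_ne_nil items i j hij hilt)]
          have hlen : PySem.Str.len (pvJc (pvSlice items i (j + 1)))
              = PySem.Str.len cur + 2 + PySem.Str.len b := by
            rw [← hsnoc, pvLen_test]
          have hscan : pvScanB items m (items.length - j) (PySem.Str.len cur) j
              = pvScanB items m (items.length - (j + 1))
                  (PySem.Str.len (pvJc (pvSlice items i (j + 1)))) (j + 1) := by
            rw [show items.length - j = (items.length - (j + 1)) + 1 from by omega, pvScanB,
              if_pos ⟨hj, hfit⟩, hlen]
          have hne' : pvJc (pvSlice items i (j + 1)) ≠ "" := by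
            intro he
            rw [he] at hlen
            have h1 : 0 < PySem.Str.len cur := (pvLen_pos_iff cur).mpr hne
            have h2 : (0:Int) ≤ PySem.Str.len b := by rw [PySem.Str.len_eq]; positivity
            have h0 : PySem.Str.len ("" : String) = 0 := by decide
            omega
          rw [hstep, hsnoc, hscan]
          exact (ih (k - 1) (by omega)).2 i (j + 1) lines (by omega) (by omega) (by omega)
            hilt hne'
        · -- overflow: A closes the line with ","; B's scan stops at j
          have hstep : pvStepA m (lines, cur) b = (lines ++ [cur ++ ","], b) := by
            dsimp only [pvStepA]
            rw [if_pos hne, pvLen_test, if_pos ⟨by omega, hne⟩]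
          have hscan : pvScanB items m (items.length - j) (PySem.Str.len cur) j = j :=
            pvScanB_stop items m _ _ j (fun hc => hfit hc.2)
          rw [hstep, hscan, if_pos hj,
            show items.length - j = (items.length - (j + 1)) + 1 from by omega, pvOuterB,
            if_pos hj]
          by_cases hb : b = ""
          · -- the overflowing item is empty: A's new current line is "", B skips it
            rw [if_pos (hbdef ▸ hb), hb]
            exact (ih (k - 1) (by omega)).1 (j + 1) (lines ++ [cur ++ ","]) (by omega)
          · -- the overflowing item opens the next line
            rw [if_neg (hbdef ▸ hb)]
            have hcur' : b = pvJc (pvSlice items j (j + 1)) := by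
              rw [pvSlice_single items j hj, pvJc_singleton, hbdef]
            have hinner := (ih (k - 1) (by omega)).2 j (j + 1) (lines ++ [cur ++ ","])
              (by omega) (by omega) (by omega) hj (by rw [← hcur']; exact hb)
            rw [← hcur'] at hinner
            rw [hbdef] at hinner ⊢
            rw [hinner]
            have hj2 := pvScanB_le items m (items.length - (j + 1))
              (PySem.Str.len (items.getD j "")) (j + 1)
            exact pvOuterB_fuel items m _ _ _ _ (by omega) (by omega)
      · -- j = items.length: the loop is over, A appends the open line, B's scan stops
        have hd : items.drop j = [] := List.drop_eq_nil_of_le (by omega)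
        have hscan : pvScanB items m (items.length - j)
            (PySem.Str.len (pvJc (pvSlice items i j))) j = j :=
          pvScanB_stop items m _ _ j (fun hc => hj hc.1)
        rw [hd, List.foldl_nil, hscan, if_neg hj,
          show items.length - j = 0 from by omega, pvOuterB, pvFinish, if_pos hne]

-- ===== VERDICT (by name: the statement is the Claim_ definition above) =====
theorem wrap_sources_spec : Claim_equal_wrap_sources := by
  intro s m _
  show wrap_sources s m = wrap_sources_alt s m
  rw [wrap_sources_eq]
  show _ = PySem.Str.join "\n"
    (pvOuterB (((PySem.Str.split? s ",").getD []).map PySem.Str.strip) m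
      (((PySem.Str.split? s ",").getD []).map PySem.Str.strip).length 0 [])
  congr 1
  have h := (pvCombined (((PySem.Str.split? s ",").getD []).map PySem.Str.strip) m
    ((((PySem.Str.split? s ",").getD []).map PySem.Str.strip).length - 0)).1 0 [] rfl
  simpa using h
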